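-- pv_equiv track=rewrite | github.com/TEAM-528/problem-solving | 정주완/Programmers/Level 3/110 옮기기.py | remove_110
-- ===== SOURCE A (Python) =====
-- def remove_110(string):
--     stack = []
--     for char in string:
--         stack.append(char)
--         # 스택에 쌓인 개수가 3개 이상이고, 마지막 3개가 '110'이면
--         if len(stack) >= 3 and ''.join(stack[-3:]) == '110':
--             stack.pop()
--             stack.pop()
--             stack.pop()
--     return ''.join(stack)
-- ===== SOURCE B (Python) =====
-- def remove_110(string):
--     # Repeated whole-string rewrite: '110' has no self-overlap, so removing all
--     # non-overlapping occurrences per sweep and re-scanning reaches the same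
--     # normal form as the greedy stack.
--     while '110' in string:
--         string = string.replace('110', '')
--     return string
-- ===== Notes on version B (the rewrite author's own statement) =====
-- stated objective: simpler
-- what changed: Replaces the character-by-character greedy stack with a fixpoint loop of whole-string str.replace sweeps removing the pattern, relying on the rewrite being confluent because the pattern has no self-overlap.
import Mathlib
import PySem

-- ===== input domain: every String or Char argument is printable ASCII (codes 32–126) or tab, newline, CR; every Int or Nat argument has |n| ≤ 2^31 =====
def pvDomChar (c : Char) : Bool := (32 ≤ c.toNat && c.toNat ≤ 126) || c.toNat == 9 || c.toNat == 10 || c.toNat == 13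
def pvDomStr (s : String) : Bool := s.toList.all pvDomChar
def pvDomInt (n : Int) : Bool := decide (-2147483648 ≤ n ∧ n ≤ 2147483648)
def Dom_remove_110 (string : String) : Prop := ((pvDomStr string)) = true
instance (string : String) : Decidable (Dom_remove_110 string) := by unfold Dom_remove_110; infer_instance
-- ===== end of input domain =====

-- B replaces the greedy character stack by a repeated whole-string replace('110','')
-- until no occurrence remains ('110' is overlap-free, so the rewrite is confluent);
-- objective: simpler.

-- ===== PORT A =====
-- stack.append(char); if len(stack) >= 3 and ''.join(stack[-3:]) == '110': pop,pop,pop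
-- (''.join(stack[-3:]) == '110' is exactly char-list equality with ['1','1','0'])
def pvStepA (stack : List Char) (char : Char) : List Char :=
  -- stack.append(char), then test the last three and pop three times if they are '110'
  if 3 ≤ (stack ++ [char]).length ∧ PySem.List.slice (stack ++ [char]) (some (-3)) none = ['1', '1', '0'] then
    (stack ++ [char]).dropLast.dropLast.dropLast            -- three .pop() calls
  else
    stack ++ [char]

def remove_110 (string : String) : String :=
  String.ofList (string.toList.foldl pvStepA [])

-- clean equations for PySem.Chars.replace.go (the scan behind str.replace)
theorem pvGo_zero (old new l acc : List Char) :
    PySem.Chars.replace.go old new 0 l acc = acc.reverse ++ l := by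
  rw [PySem.Chars.replace.go.eq_def]

theorem pvGo_nil (old new : List Char) (fuel : Nat) (acc : List Char) :
    PySem.Chars.replace.go old new (fuel + 1) [] acc = acc.reverse := by
  rw [PySem.Chars.replace.go.eq_def]

theorem pvGo_cons (old new : List Char) (fuel : Nat) (c : Char) (t acc : List Char) :
    PySem.Chars.replace.go old new (fuel + 1) (c :: t) acc
      = if old.isPrefixOf (c :: t) = true then
          PySem.Chars.replace.go old new fuel (List.drop old.length (c :: t)) (new.reverse ++ acc)
        else
          PySem.Chars.replace.go old new fuel t (c :: acc) := by
  rw [PySem.Chars.replace.go.eq_def]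

-- ===== PORT B =====
-- termination lemmas for B's while-loop (cited by name in decreasing_by)
theorem pvGo_len_le (fuel : Nat) : ∀ (l acc : List Char),
    (PySem.Chars.replace.go ['1', '1', '0'] [] fuel l acc).length ≤ acc.length + l.length := by
  induction fuel with
  | zero =>
    intro l acc
    rw [pvGo_zero]
    simp
  | succ fuel ih =>
    intro l acc
    cases l with
    | nil => rw [pvGo_nil]; simp
    | cons c t =>
      rw [pvGo_cons]
      split
      · calc (PySem.Chars.replace.go ['1','1','0'] [] fuel (List.drop (['1','1','0'] : List Char).length (c :: t)) (([] : List Char).reverse ++ acc)).length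
            ≤ (([] : List Char).reverse ++ acc).length + (List.drop (['1','1','0'] : List Char).length (c :: t)).length := ih _ _
          _ ≤ acc.length + (c :: t).length := by simp; omega
      · calc (PySem.Chars.replace.go ['1','1','0'] [] fuel t (c :: acc)).length
            ≤ (c :: acc).length + t.length := ih _ _
          _ = acc.length + (c :: t).length := by simp; omega

theorem pvGo_len_lt (fuel : Nat) : ∀ (l acc : List Char), l.length ≤ fuel →
    ['1', '1', '0'] <:+: l →
    (PySem.Chars.replace.go ['1', '1', '0'] [] fuel l acc).length < acc.length + l.length := by
  induction fuel with
  | zero =>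
    intro l acc hlen hinf
    cases l with
    | nil => exact absurd hinf (by decide)
    | cons c t => simp at hlen
  | succ fuel ih =>
    intro l acc hlen hinf
    cases l with
    | nil => exact absurd hinf (by decide)
    | cons c t =>
      rw [pvGo_cons]
      split
      · rename_i hpre
        have hp : ['1','1','0'] <+: (c :: t) := List.isPrefixOf_iff_prefix.mp hpre
        obtain ⟨r, hr⟩ := hp
        calc (PySem.Chars.replace.go ['1','1','0'] [] fuel (List.drop (['1','1','0'] : List Char).length (c :: t)) (([] : List Char).reverse ++ acc)).length
            ≤ (([] : List Char).reverse ++ acc).length + (List.drop (['1','1','0'] : List Char).length (c :: t)).length := pvGo_len_le _ _ _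
          _ < acc.length + (c :: t).length := by
              rw [← hr]; simp; omega
      · rename_i hpre
        have hinf' : ['1','1','0'] <:+: t := by
          rcases List.infix_cons_iff.mp hinf with hp | hi
          · exact absurd (List.isPrefixOf_iff_prefix.mpr hp) hpre
          · exact hi
        calc (PySem.Chars.replace.go ['1','1','0'] [] fuel t (c :: acc)).length
            < (c :: acc).length + t.length := ih t (c :: acc) (by simp at hlen ⊢; omega) hinf'
          _ = acc.length + (c :: t).length := by simp; omega

theorem pvReplace_len_lt (s : String) (h : PySem.Str.isIn "110" s = true) :
    (PySem.Str.replace s "110" "").toList.length < s.toList.length := by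
  have hinf : ['1','1','0'] <:+: s.toList := by
    have := (PySem.Str.isIn_iff_infix "110" s).mp h
    simpa using this
  show (PySem.Str.replace s "110" "").toList.length < s.toList.length
  unfold PySem.Str.replace PySem.Chars.replace
  simp only [String.toList_ofList]
  have h110 : ("110" : String).toList = ['1','1','0'] := by decide
  rw [h110]
  rw [if_neg (by decide : ¬ (['1','1','0'] : List Char).isEmpty = true)]
  have := pvGo_len_lt s.toList.length s.toList [] le_rfl hinf
  simpa using this

-- B: while '110' in string: string = string.replace('110', '')
def remove_110_alt (string : String) : String :=
  if h : PySem.Str.isIn "110" string = true then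
    remove_110_alt (PySem.Str.replace string "110" "")
  else
    string
termination_by string.toList.length
decreasing_by exact pvReplace_len_lt string h

-- ===== PRECONDITION & SPEC =====
def Spec_remove_110 (string : String) (out : String) : Prop := out = remove_110_alt string
instance (string : String) (out : String) : Decidable (Spec_remove_110 string out) := by unfold Spec_remove_110; infer_instance

-- ===== CLAIM (what is proved, stated in full; the proofs are below) =====
def Claim_equal_remove_110 : Prop := ∀ (string : String), Dom_remove_110 string → Spec_remove_110 string (remove_110 string)

-- ===== LEMMAS AND PROOFS =====

-- stack[-3:] is the last three elements once the stack has at least three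
theorem pvSlice_neg3 (st : List Char) (h : 3 ≤ st.length) :
    PySem.List.slice st (some (-3)) none = st.drop (st.length - 3) := by
  unfold PySem.List.slice PySem.List.clampIdx
  have h1 : ¬ ((st.length : Int) + (-3) < 0) := by omega
  simp only [if_pos (by omega : (-3 : Int) < 0), if_neg h1]
  have h2 : ((st.length : Int) + (-3)).toNat = st.length - 3 := by omega
  rw [h2]
  apply List.take_of_length_le
  simp

-- pushing '1' never triggers a pop
theorem pvStep_one (st : List Char) : pvStepA st '1' = st ++ ['1'] := by
  unfold pvStepA
  split
  · rename_i hc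
    obtain ⟨h3, hsl⟩ := hc
    rw [pvSlice_neg3 _ h3] at hsl
    have hsplit := List.take_append_drop ((st ++ ['1']).length - 3) (st ++ ['1'])
    rw [hsl] at hsplit
    have := congrArg List.getLast? hsplit
    simp [List.getLast?_append] at this
  · rfl

-- pushing '0' onto a stack ending in "11" pops all three
theorem pvStep_pop (st : List Char) : pvStepA (st ++ ['1', '1']) '0' = st := by
  unfold pvStepA
  have hassoc : (st ++ ['1', '1']) ++ ['0'] = st ++ ['1', '1', '0'] := by simp
  rw [hassoc]
  have h3 : 3 ≤ (st ++ ['1', '1', '0']).length := by simp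
  have hsl : PySem.List.slice (st ++ ['1', '1', '0']) (some (-3)) none = ['1', '1', '0'] := by
    rw [pvSlice_neg3 _ h3]
    have : (st ++ ['1', '1', '0']).length - 3 = st.length := by simp
    rw [this]
    exact List.drop_left
  rw [if_pos ⟨h3, hsl⟩]
  have : st ++ ['1', '1', '0'] = ((st ++ ['1']) ++ ['1']) ++ ['0'] := by simp
  rw [this, List.dropLast_concat, List.dropLast_concat, List.dropLast_concat]

-- feeding "110" to the stack machine is a no-op, from any stack
theorem pv110 (st : List Char) (y : List Char) :
    ('1' :: '1' :: '0' :: y).foldl pvStepA st = y.foldl pvStepA st := by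
  simp only [List.foldl]
  rw [pvStep_one st]
  rw [pvStep_one (st ++ ['1'])]
  have : (st ++ ['1']) ++ ['1'] = st ++ ['1', '1'] := by simp
  rw [this, pvStep_pop]

-- one replace sweep does not change the stack machine's final state
theorem pvGo_fold (fuel : Nat) : ∀ (l acc st : List Char), l.length ≤ fuel →
    (PySem.Chars.replace.go ['1', '1', '0'] [] fuel l acc).foldl pvStepA st
      = l.foldl pvStepA (acc.reverse.foldl pvStepA st) := by
  induction fuel with
  | zero =>
    intro l acc st hlen
    cases l with
    | nil => rw [pvGo_zero]; simp
    | cons c t => simp at hlen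
  | succ fuel ih =>
    intro l acc st hlen
    cases l with
    | nil => rw [pvGo_nil]; simp
    | cons c t =>
      rw [pvGo_cons]
      split
      · rename_i hpre
        obtain ⟨r, hr⟩ := List.isPrefixOf_iff_prefix.mp hpre
        have hdrop : List.drop (['1','1','0'] : List Char).length (c :: t) = r := by
          rw [← hr]; simp
        have hlenr : r.length ≤ fuel := by
          have : (c :: t).length = r.length + 3 := by rw [← hr]; simp
          omega
        rw [hdrop]
        simp only [List.reverse_nil, List.nil_append]
        rw [ih r acc st hlenr]
        rw [← hr]
        exact (pv110 _ r).symm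
      · rw [ih t (c :: acc) st (by simp at hlen ⊢; omega)]
        simp [List.foldl_append]

theorem pvReplace_fold (s : List Char) :
    (PySem.Chars.replace s ['1', '1', '0'] []).foldl pvStepA []
      = s.foldl pvStepA [] := by
  unfold PySem.Chars.replace
  rw [if_neg (by decide : ¬ (['1','1','0'] : List Char).isEmpty = true)]
  rw [pvGo_fold s.length s [] [] le_rfl]
  simp

-- on a 110-free tail the stack machine just appends
theorem pvNo110 : ∀ (l st : List Char), ¬ (['1', '1', '0'] <:+: st ++ l) →
    l.foldl pvStepA st = st ++ l := by
  intro l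
  induction l with
  | nil => intro st _; simp
  | cons c t ih =>
    intro st hni
    have hstep : pvStepA st c = st ++ [c] := by
      unfold pvStepA
      split
      · rename_i hc
        obtain ⟨h3, hsl⟩ := hc
        rw [pvSlice_neg3 _ h3] at hsl
        exfalso
        apply hni
        have hsuf : ['1', '1', '0'] <:+ st ++ [c] := hsl ▸ List.drop_suffix _ _
        have hpre : st ++ [c] <+: st ++ (c :: t) := by
          refine ⟨t, ?_⟩; simp
        exact List.IsInfix.trans hsuf.isInfix hpre.isInfix
      · rfl
    show t.foldl pvStepA (pvStepA st c) = st ++ (c :: t)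
    rw [hstep]
    have : st ++ c :: t = (st ++ [c]) ++ t := by simp
    rw [this] at hni ⊢
    exact ih (st ++ [c]) hni

-- main induction: B's while-loop computes the stack machine's result
theorem pvAltChar : ∀ (s : String),
    remove_110_alt s = String.ofList (s.toList.foldl pvStepA []) := by
  intro s
  induction s using remove_110_alt.induct with
  | case1 s h ih =>
    rw [remove_110_alt, dif_pos h, ih]
    congr 1
    show (PySem.Str.replace s "110" "").toList.foldl pvStepA [] = _
    unfold PySem.Str.replace
    rw [String.toList_ofList]
    have h110 : ("110" : String).toList = ['1','1','0'] := by decide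
    have hemp : ("" : String).toList = ([] : List Char) := by decide
    rw [h110, hemp]
    exact pvReplace_fold s.toList
  | case2 s h =>
    rw [remove_110_alt, dif_neg h]
    have hni : ¬ (['1', '1', '0'] <:+: s.toList) := by
      intro hinf
      exact h ((PySem.Str.isIn_iff_infix "110" s).mpr (by simpa using hinf))
    have := pvNo110 s.toList [] (by simpa using hni)
    rw [this]
    simp [String.ofList_toList]

-- ===== VERDICT (by name: the statement is the Claim_ definition above) =====
theorem remove_110_spec : Claim_equal_remove_110 := by
  intro string _
  unfold Spec_remove_110 remove_110
  rw [pvAltChar string]
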